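-- pv_equiv track=rewrite | github.com/Cyp2C19/projet-assemblage | assembly.py | creerOcc
-- ===== SOURCE A (Python) =====
-- def creerOcc(tBx):
--     tOcc = [];
--     cmpS = 0;  # Compteur de lettre $ dans Bx
--     cmpA = 0;
--     cmpC = 0;
--     cmpG = 0;
--     cmpT = 0;
--     ligne = [];
--     for i in range(1, len(tBx) + 1):
--         ligne = [];
--         for j in tBx[:i]:
--             if j == '$':
--                 cmpS = cmpS + 1;
--             elif j == 'A':
--                 cmpA = cmpA + 1;
--             elif j == 'C':
--                 cmpC = cmpC + 1;
--             elif j == 'G':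
--                 cmpG = cmpG + 1;
--             elif j == 'T':
--                 cmpT = cmpT + 1;
--
--         ligne.append(cmpS);
--         ligne.append(cmpA);
--         ligne.append(cmpC);
--         ligne.append(cmpG);
--         ligne.append(cmpT);
--         cmpS = 0;
--         cmpA = 0;
--         cmpC = 0;
--         cmpG = 0;
--         cmpT = 0;
--         tOcc.append(ligne);
--
--     return tOcc;
-- ===== SOURCE B (Python) =====
-- def creerOcc(tBx):
--     tOcc = []
--     cmpS = cmpA = cmpC = cmpG = cmpT = 0
--     for ch in tBx:
--         if ch == '$':
--             cmpS += 1
--         elif ch == 'A':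
--             cmpA += 1
--         elif ch == 'C':
--             cmpC += 1
--         elif ch == 'G':
--             cmpG += 1
--         elif ch == 'T':
--             cmpT += 1
--         tOcc.append([cmpS, cmpA, cmpC, cmpG, cmpT])
--     return tOcc
-- ===== Notes on version B (the rewrite author's own statement) =====
-- stated objective: faster
-- what changed: B keeps running counters and appends one row per character in a single pass instead of recounting each prefix from scratch.
import Mathlib
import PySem

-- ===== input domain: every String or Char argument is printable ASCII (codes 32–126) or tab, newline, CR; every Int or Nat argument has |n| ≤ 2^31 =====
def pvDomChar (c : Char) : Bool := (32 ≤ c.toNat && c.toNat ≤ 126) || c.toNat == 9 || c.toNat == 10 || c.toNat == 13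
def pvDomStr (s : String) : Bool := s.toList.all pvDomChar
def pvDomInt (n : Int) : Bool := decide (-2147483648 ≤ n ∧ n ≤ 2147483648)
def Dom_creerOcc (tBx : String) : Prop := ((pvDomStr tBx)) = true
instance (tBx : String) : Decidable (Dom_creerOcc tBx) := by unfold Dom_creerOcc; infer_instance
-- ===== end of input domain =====

-- B replaces A's per-prefix recount (quadratic) by a single pass with running counters; objective: faster (asymptotic).

-- shared helper: the if/elif classification both Pythons perform on one character
def pvStep (s : Int × Int × Int × Int × Int) (j : Char) : Int × Int × Int × Int × Int :=
  if j = '$' then (s.1 + 1, s.2.1, s.2.2.1, s.2.2.2.1, s.2.2.2.2)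
  else if j = 'A' then (s.1, s.2.1 + 1, s.2.2.1, s.2.2.2.1, s.2.2.2.2)
  else if j = 'C' then (s.1, s.2.1, s.2.2.1 + 1, s.2.2.2.1, s.2.2.2.2)
  else if j = 'G' then (s.1, s.2.1, s.2.2.1, s.2.2.2.1 + 1, s.2.2.2.2)
  else if j = 'T' then (s.1, s.2.1, s.2.2.1, s.2.2.2.1, s.2.2.2.2 + 1)
  else s

-- shared helper: ligne.append(cmpS); … — the row [cmpS, cmpA, cmpC, cmpG, cmpT]
def pvRow (s : Int × Int × Int × Int × Int) : List Int :=
  [s.1, s.2.1, s.2.2.1, s.2.2.2.1, s.2.2.2.2]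

-- ===== PORT A =====
-- for i in range(1, len(tBx)+1): recount tBx[:i] from zeroed counters, append the row
def creerOcc (tBx : String) : List (List Int) :=
  let cs := tBx.toList
  (PySem.List.pyRange 1 ((cs.length : Int) + 1) 1).foldl
    (fun tOcc i =>
      tOcc ++ [pvRow ((PySem.List.slice cs none (some i)).foldl pvStep (0, 0, 0, 0, 0))])
    []

-- ===== PORT B =====
-- one pass: running counters, one row appended per character
def creerOcc_alt (tBx : String) : List (List Int) :=
  (tBx.toList.foldl
    (fun (p : (Int × Int × Int × Int × Int) × List (List Int)) ch =>
      let st := pvStep p.1 ch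
      (st, p.2 ++ [pvRow st]))
    ((0, 0, 0, 0, 0), [])).2

-- ===== PRECONDITION & SPEC =====
def Spec_creerOcc (tBx : String) (out : List (List Int)) : Prop := out = creerOcc_alt tBx
instance (tBx : String) (out : List (List Int)) : Decidable (Spec_creerOcc tBx out) := by unfold Spec_creerOcc; infer_instance

-- ===== CLAIM (what is proved, stated in full; the proofs are below) =====
def Claim_equal_creerOcc : Prop := ∀ (tBx : String), Dom_creerOcc tBx → Spec_creerOcc tBx (creerOcc tBx)

-- ===== LEMMAS AND PROOFS =====

-- B's single pass started from state s over l produces one row per prefix of l, folded from s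
lemma pv_bfold (l : List Char) (s : Int × Int × Int × Int × Int) (acc : List (List Int)) :
    (l.foldl (fun (p : (Int × Int × Int × Int × Int) × List (List Int)) ch =>
        let st := pvStep p.1 ch
        (st, p.2 ++ [pvRow st])) (s, acc)).2
      = acc ++ (List.range l.length).map (fun k => pvRow ((l.take (k + 1)).foldl pvStep s)) := by
  induction l generalizing s acc with
  | nil => simp
  | cons c t ih =>
      simp only [List.foldl_cons, ih, List.length_cons, List.range_succ_eq_map]
      simp [List.map_map, Function.comp_def]

-- A's outer loop is the same per-prefix table
lemma pv_afold (cs : List Char) :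
    (PySem.List.pyRange 1 ((cs.length : Int) + 1) 1).foldl
      (fun tOcc i =>
        tOcc ++ [pvRow ((PySem.List.slice cs none (some i)).foldl pvStep (0, 0, 0, 0, 0))]) []
      = (List.range cs.length).map (fun k => pvRow ((cs.take (k + 1)).foldl pvStep (0, 0, 0, 0, 0))) := by
  rw [PySem.List.foldl_append_singleton_eq_map, PySem.List.pyRange_one]
  have hlen : (((cs.length : Int) + 1 - 1)).toNat = cs.length := by omega
  simp only [List.nil_append, hlen, List.map_map]
  refine List.map_congr_left ?_
  intro k hk
  have h0 : (0 : Int) ≤ 1 + (k : Int) := by positivity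
  have ht : (1 + (k : Int)).toNat = k + 1 := by omega
  simp only [Function.comp_def, PySem.List.slice_to _ h0, ht]

-- ===== VERDICT (by name: the statement is the Claim_ definition above) =====
theorem creerOcc_spec : Claim_equal_creerOcc := by
  intro tBx _
  show creerOcc tBx = creerOcc_alt tBx
  unfold creerOcc creerOcc_alt
  rw [pv_bfold, pv_afold]
  simp
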